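-- pv_equiv track=rewrite | github.com/keerthivnair/Codeforces-toSpecialist | A_Relics_of_Forgotten_Empire.py | who_wins
-- ===== SOURCE A (Python) =====
-- def who_wins(nums):
--     n = len(nums)
--     nums.sort(reverse=True)  # sort descending
--
--     # dp[i][turn] = (alice_score, bob_score)
--     dp = [[(0, 0) for _ in range(2)] for _ in range(n + 1)]
--
--     for i in range(n - 1, -1, -1):
--         for turn in range(2):
--             num = nums[i]
--
--             # Option 1: current player picks the number
--             if turn == 0:  # Alice's turn
--                 if num % 2 == 0:
--                     pick = (dp[i + 1][1][0] + num, dp[i + 1][1][1])  # Alice gets points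
--                 else:
--                     pick = (dp[i + 1][1][0], dp[i + 1][1][1])  # Just block Bob
--
--             else:  # Bob's turn
--                 if num % 2 == 1:
--                     pick = (dp[i + 1][0][0], dp[i + 1][0][1] + num)  # Bob gets points
--                 else:
--                     pick = (dp[i + 1][0][0], dp[i + 1][0][1])  # Just block Alice
--
--             # Option 2: skip the number
--             skip = dp[i + 1][1 - turn]
--
--             # Choose the better option for current player
--             if turn == 0:
--                 # Alice maximizes her score
--                 if pick[0] > skip[0]:
--                     dp[i][turn] = pick
--                 elif pick[0] < skip[0]:
--                     dp[i][turn] = skip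
--                 else:
--                     # Tie in Alice score → prefer better Bob score
--                     dp[i][turn] = pick if pick[1] <= skip[1] else skip
--             else:
--                 # Bob maximizes his score
--                 if pick[1] > skip[1]:
--                     dp[i][turn] = pick
--                 elif pick[1] < skip[1]:
--                     dp[i][turn] = skip
--                 else:
--                     # Tie in Bob score → prefer better Alice score
--                     dp[i][turn] = pick if pick[0] <= skip[0] else skip
--
--     alice_score, bob_score = dp[0][0]
--
--     if alice_score > bob_score:
--         return "Alice"
--     elif alice_score < bob_score:
--         return "Bob"
--     else:
--         return "Tie"
-- ===== SOURCE B (Python) =====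
-- def who_wins(nums):
--     nums.sort(reverse=True)
--     alice = bob = 0
--     for i, v in enumerate(nums):
--         if v > 0:
--             if i % 2 == 0:
--                 if v % 2 == 0:
--                     alice += v
--             else:
--                 if v % 2 == 1:
--                     bob += v
--     if alice > bob:
--         return "Alice"
--     elif alice < bob:
--         return "Bob"
--     else:
--         return "Tie"
-- ===== Notes on version B (the rewrite author's own statement) =====
-- stated objective: simpler
-- what changed: Replaced the backward two-state DP table (dp[i][turn] with pick/skip comparisons) by a single forward pass over the descending-sorted list that adds each positive parity-matching value to Alice's or Bob's total according to index parity.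
import Mathlib
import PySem

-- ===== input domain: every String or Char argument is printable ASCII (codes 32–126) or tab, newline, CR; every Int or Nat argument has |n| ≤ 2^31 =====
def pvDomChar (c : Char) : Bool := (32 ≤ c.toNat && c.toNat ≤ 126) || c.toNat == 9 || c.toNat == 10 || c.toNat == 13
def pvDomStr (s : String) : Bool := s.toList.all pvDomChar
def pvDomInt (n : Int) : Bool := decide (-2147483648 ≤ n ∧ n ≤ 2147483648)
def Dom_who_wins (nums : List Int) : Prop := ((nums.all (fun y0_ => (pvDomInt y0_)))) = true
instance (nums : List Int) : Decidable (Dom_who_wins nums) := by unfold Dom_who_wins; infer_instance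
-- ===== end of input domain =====

-- B replaces A's backward two-entry DP table by a single forward pass over the
-- descending-sorted list (objective: simpler; same cost).  Both Pythons sort the
-- argument list in place; the equivalence proved here is about the RETURN value.

-- ===== PORT A =====
-- A-side helper: the body of A's outer loop over i; the inner 'for turn in range(2)'
-- loop is the fold inside.  dp[i][turn] reads/writes use pyGetD / List.set; every
-- index the loop reaches is in range, so the defaults are never returned.
def pvAStep (snums : List Int) (dp : List (List (Int × Int))) (i : Int) :
    List (List (Int × Int)) :=
  (PySem.List.pyRange 0 2 1).foldl (fun dp turn =>
    let num := PySem.List.pyGetD snums i 0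
    let pick :=
      if turn = 0 then
        if PySem.Int.mod num 2 = 0 then
          ((PySem.List.pyGetD (PySem.List.pyGetD dp (i+1) []) 1 (0, 0)).1 + num,
           (PySem.List.pyGetD (PySem.List.pyGetD dp (i+1) []) 1 (0, 0)).2)
        else
          ((PySem.List.pyGetD (PySem.List.pyGetD dp (i+1) []) 1 (0, 0)).1,
           (PySem.List.pyGetD (PySem.List.pyGetD dp (i+1) []) 1 (0, 0)).2)
      else
        if PySem.Int.mod num 2 = 1 then
          ((PySem.List.pyGetD (PySem.List.pyGetD dp (i+1) []) 0 (0, 0)).1,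
           (PySem.List.pyGetD (PySem.List.pyGetD dp (i+1) []) 0 (0, 0)).2 + num)
        else
          ((PySem.List.pyGetD (PySem.List.pyGetD dp (i+1) []) 0 (0, 0)).1,
           (PySem.List.pyGetD (PySem.List.pyGetD dp (i+1) []) 0 (0, 0)).2)
    let skip := PySem.List.pyGetD (PySem.List.pyGetD dp (i+1) []) (1 - turn) (0, 0)
    let new :=
      if turn = 0 then
        if pick.1 > skip.1 then pick
        else if pick.1 < skip.1 then skip
        else if pick.2 ≤ skip.2 then pick else skip
      else
        if pick.2 > skip.2 then pick
        else if pick.2 < skip.2 then skip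
        else if pick.1 ≤ skip.1 then pick else skip
    dp.set i.toNat ((PySem.List.pyGetD dp i []).set turn.toNat new)) dp

def who_wins (nums : List Int) : String :=
  let n : Int := (nums.length : Int)
  let snums := PySem.List.sorted nums (fun x => x) true
  let dp0 : List (List (Int × Int)) :=
    List.replicate (nums.length + 1) [((0 : Int), (0 : Int)), ((0 : Int), (0 : Int))]
  let dp := (PySem.List.pyRange (n - 1) (-1) (-1)).foldl (pvAStep snums) dp0
  let res := PySem.List.pyGetD (PySem.List.pyGetD dp 0 []) 0 (0, 0)
  if res.1 > res.2 then "Alice" else if res.1 < res.2 then "Bob" else "Tie"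

-- ===== PORT B =====
def who_wins_alt (nums : List Int) : String :=
  let snums := PySem.List.sorted nums (fun x => x) true
  let ab := (PySem.List.enumerate snums 0).foldl
    (fun (ab : Int × Int) (p : Int × Int) =>
      if p.2 > 0 then
        if PySem.Int.mod p.1 2 = 0 then
          if PySem.Int.mod p.2 2 = 0 then (ab.1 + p.2, ab.2) else ab
        else
          if PySem.Int.mod p.2 2 = 1 then (ab.1, ab.2 + p.2) else ab
      else ab) ((0 : Int), (0 : Int))
  if ab.1 > ab.2 then "Alice" else if ab.1 < ab.2 then "Bob" else "Tie"

-- ===== PRECONDITION & SPEC =====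
def Spec_who_wins (nums : List Int) (out : String) : Prop := out = who_wins_alt nums
instance (nums : List Int) (out : String) : Decidable (Spec_who_wins nums out) := by unfold Spec_who_wins; infer_instance

-- ===== CLAIM (what is proved, stated in full; the proofs are below) =====
def Claim_equal_who_wins : Prop := ∀ (nums : List Int), Dom_who_wins nums → Spec_who_wins nums (who_wins nums)

-- ===== LEMMAS AND PROOFS =====

-- Optimal (alice, bob) score pair of a suffix; turn false = Alice to move.
-- In A's game only even positive numbers help Alice, odd positive ones Bob.
def pvScore : List Int → Bool → Int × Int
  | [], _ => (0, 0)
  | v :: vs, false =>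
      let s := pvScore vs true
      if v % 2 = 0 ∧ 0 < v then (s.1 + v, s.2) else s
  | v :: vs, true =>
      let s := pvScore vs false
      if v % 2 = 1 ∧ 0 < v then (s.1, s.2 + v) else s

theorem pvScore_cons_false (v : Int) (vs : List Int) :
    pvScore (v :: vs) false =
      if v % 2 = 0 ∧ 0 < v then ((pvScore vs true).1 + v, (pvScore vs true).2)
      else pvScore vs true := rfl

theorem pvScore_cons_true (v : Int) (vs : List Int) :
    pvScore (v :: vs) true =
      if v % 2 = 1 ∧ 0 < v then ((pvScore vs false).1, (pvScore vs false).2 + v)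
      else pvScore vs false := rfl

def pvInit : List (Int × Int) := [(0, 0), (0, 0)]

-- A's dp table after the outer loop has processed indices n-1, …, j
def pvDp (xs : List Int) (j : Nat) : List (List (Int × Int)) :=
  List.replicate j pvInit ++
    (List.range (xs.length + 1 - j)).map
      (fun k => [pvScore (xs.drop (j + k)) false, pvScore (xs.drop (j + k)) true])

set_option maxHeartbeats 1000000 in
theorem pvAStep_eq (xs : List Int) (j : Nat) (hj : j < xs.length) :
    pvAStep xs (pvDp xs (j + 1)) (j : Int) = pvDp xs j := by
  have hv2 : ∀ v : Int, PySem.Int.mod v 2 = v % 2 :=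
    fun v => PySem.Int.mod_eq_emod_of_pos (by omega)
  -- abbreviations
  set n := xs.length with hn
  set M := (List.range (n - j)).map
      (fun k => [pvScore (xs.drop (j + 1 + k)) false, pvScore (xs.drop (j + 1 + k)) true])
    with hM
  have hdp1 : pvDp xs (j + 1) = List.replicate j pvInit ++ ([pvInit] ++ M) := by
    rw [pvDp, show xs.length + 1 - (j + 1) = n - j from by omega, List.replicate_succ',
      List.append_assoc, ← hM]
  have hcast : ((j : Int) + 1) = (((j + 1 : Nat) : Int)) := by push_cast; ring
  have hM0 : M.getD 0 [] = [pvScore (xs.drop (j + 1)) false, pvScore (xs.drop (j + 1)) true] := by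
    rw [hM]
    have : n - j = (n - j - 1) + 1 := by omega
    rw [this, List.range_succ_eq_map]
    simp
  -- generic reads for any dp of the shape replicate j pvInit ++ ([e] ++ M)
  have hget1 : ∀ e : List (Int × Int), PySem.List.pyGetD
      (List.replicate j pvInit ++ ([e] ++ M)) ((j : Int) + 1) []
        = [pvScore (xs.drop (j + 1)) false, pvScore (xs.drop (j + 1)) true] := by
    intro e
    rw [hcast, PySem.List.pyGetD_natCast]
    have h1 : (List.replicate j (pvInit : List (Int × Int))).length ≤ j + 1 := by simp
    simp only [List.getD, List.getElem?_append_right h1, List.length_replicate]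
    rw [show j + 1 - j = 1 by omega, List.singleton_append, List.getElem?_cons_succ]
    exact hM0
  have hget0 : ∀ e : List (Int × Int), PySem.List.pyGetD
      (List.replicate j pvInit ++ ([e] ++ M)) ((j : Int)) [] = e := by
    intro e
    rw [PySem.List.pyGetD_natCast]
    simp [List.getD]
  have hset : ∀ (e x : List (Int × Int)), (List.replicate j pvInit ++ ([e] ++ M)).set
      ((j : Int)).toNat x = List.replicate j pvInit ++ ([x] ++ M) := by
    intro e x
    rw [Int.toNat_natCast, List.set_append]
    simp
  have hnum : PySem.List.pyGetD xs ((j : Int)) 0 = xs[j] := by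
    rw [PySem.List.pyGetD_natCast]
    exact List.getD_eq_getElem xs 0 hj
  have g0 : ∀ (a b d : Int × Int), PySem.List.pyGetD [a, b] 0 d = a := fun _ _ _ => rfl
  have g1 : ∀ (a b d : Int × Int), PySem.List.pyGetD [a, b] 1 d = b := fun _ _ _ => rfl
  unfold pvAStep
  rw [show PySem.List.pyRange 0 2 1 = [0, 1] from rfl, List.foldl_cons, List.foldl_cons,
    List.foldl_nil]
  simp only [hdp1, hget1, hget0, hset, hnum, reduceIte, Int.reduceEq, Int.toNat_zero,
    Int.toNat_one, Int.reduceSub, hv2, g0, g1]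
  -- name the suffix scores
  set S := pvScore (xs.drop (j + 1)) true with hS
  set T := pvScore (xs.drop (j + 1)) false with hT
  -- expand pvDp xs j
  have hdpj : pvDp xs j = List.replicate j pvInit ++
      ([[pvScore (xs.drop j) false, pvScore (xs.drop j) true]] ++ M) := by
    rw [pvDp, show n + 1 - j = (n - j) + 1 by omega, List.range_succ_eq_map,
      List.map_cons, List.map_map, Nat.add_zero, hM, List.singleton_append]
    congr 2
    apply List.map_congr_left
    intro k hk
    simp only [Function.comp_apply]
    have h3 : j + Nat.succ k = j + 1 + k := by omega
    rw [h3]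
  rw [hdpj]
  congr 2
  have hdrop : xs.drop j = xs[j] :: xs.drop (j + 1) := List.drop_eq_getElem_cons hj
  rw [hdrop, pvScore_cons_false, pvScore_cons_true, ← hS, ← hT]
  rcases Int.emod_two_eq xs[j] with hv | hv <;>
    simp only [hv] <;> split_ifs <;>
    (try (exact absurd trivial (by assumption))) <;>
    simp only [pvInit, List.set, List.cons.injEq, and_true, true_and] <;>
    (try constructor) <;> (try (apply Prod.ext)) <;> (try (dsimp only at *)) <;>
    (try (simp only [true_and, gt_iff_lt] at *)) <;> omega

theorem pvGetD_cons_zero {α : Type} (a : α) (l : List α) (d : α) :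
    PySem.List.pyGetD (a :: l) 0 d = a := by
  rw [show ((0 : Int)) = ((0 : Nat) : Int) from rfl, PySem.List.pyGetD_natCast]; rfl

theorem pvFoldA (xs : List Int) : ∀ j, j ≤ xs.length →
    (PySem.List.pyRange ((j : Int) - 1) (-1) (-1)).foldl (pvAStep xs) (pvDp xs j)
      = pvDp xs 0 := by
  intro j
  induction j with
  | zero => intro _; simp
  | succ j ih =>
      intro hj
      rw [show ((j + 1 : Nat) : Int) - 1 = (j : Int) by push_cast; ring,
        PySem.List.pyRange_neg_one_cons (by omega : (-1 : Int) < (j : Int)),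
        List.foldl_cons, pvAStep_eq xs j (by omega)]
      exact ih (by omega)

theorem pvFoldB (xs : List Int) : ∀ (s : Int) (ab : Int × Int), 0 ≤ s →
    (PySem.List.enumerate xs s).foldl
      (fun (ab : Int × Int) (p : Int × Int) =>
        if p.2 > 0 then
          if PySem.Int.mod p.1 2 = 0 then
            if PySem.Int.mod p.2 2 = 0 then (ab.1 + p.2, ab.2) else ab
          else
            if PySem.Int.mod p.2 2 = 1 then (ab.1, ab.2 + p.2) else ab
        else ab) ab
    = (ab.1 + (pvScore xs (decide (s % 2 = 1))).1,
       ab.2 + (pvScore xs (decide (s % 2 = 1))).2) := by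
  induction xs with
  | nil => intro s ab hs; simp [PySem.List.enumerate, pvScore]
  | cons v vs ih =>
    intro s ab hs
    rw [PySem.List.enumerate_cons, List.foldl_cons, ih (s+1) _ (by omega)]
    have h2 : PySem.Int.mod s 2 = s % 2 := PySem.Int.mod_eq_emod_of_pos (by omega)
    have hv2 : PySem.Int.mod v 2 = v % 2 := PySem.Int.mod_eq_emod_of_pos (by omega)
    rcases Int.emod_two_eq s with h | h
    · have hs1 : (s+1) % 2 = 1 := by omega
      rw [h, hs1]
      simp only [Int.reduceEq, decide_true, decide_false, pvScore_cons_false, h2, hv2, h]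
      split_ifs <;> try contradiction
      all_goals (apply Prod.ext <;> dsimp only <;> omega)
    · have hs1 : (s+1) % 2 = 0 := by omega
      rw [h, hs1]
      simp only [Int.reduceEq, decide_true, decide_false, pvScore_cons_true, h2, hv2, h]
      split_ifs <;> try contradiction
      all_goals (apply Prod.ext <;> dsimp only <;> omega)

-- ===== VERDICT (by name: the statement is the Claim_ definition above) =====
theorem who_wins_spec : Claim_equal_who_wins := by
  intro nums _
  unfold Spec_who_wins who_wins who_wins_alt
  dsimp only
  set xs := PySem.List.sorted nums (fun x => x) true with hxs
  have hlen : xs.length = nums.length := by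
    rw [hxs]; exact PySem.List.length_sorted nums (fun x => x) true
  -- the initial table is pvDp xs xs.length
  have hdp0 : List.replicate (nums.length + 1)
      ([((0 : Int), (0 : Int)), ((0 : Int), (0 : Int))]) = pvDp xs xs.length := by
    rw [pvDp, show xs.length + 1 - xs.length = 1 by omega]
    have hdrop : xs.drop (xs.length + 0) = [] := by simp
    rw [List.range_succ, List.range_zero]
    simp only [List.map_cons, List.map_nil, List.nil_append, hdrop]
    rw [show pvScore [] false = ((0 : Int), (0 : Int)) from rfl,
      show pvScore [] true = ((0 : Int), (0 : Int)) from rfl, ← hlen, List.replicate_succ']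
    rfl
  -- run A's loop
  have hfold : (PySem.List.pyRange ((nums.length : Int) - 1) (-1) (-1)).foldl
      (pvAStep xs) (pvDp xs xs.length) = pvDp xs 0 := by
    rw [← hlen]
    exact pvFoldA xs xs.length (le_refl _)
  rw [hdp0, hfold]
  -- read off dp[0][0]
  have hres : PySem.List.pyGetD (PySem.List.pyGetD (pvDp xs 0) 0 []) 0 (0, 0)
      = pvScore xs false := by
    rw [pvDp]
    simp only [List.replicate, List.nil_append, Nat.sub_zero]
    rw [List.range_succ_eq_map, List.map_cons, pvGetD_cons_zero, pvGetD_cons_zero]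
    simp
  rw [hres]
  -- run B's loop
  rw [pvFoldB xs 0 ((0 : Int), (0 : Int)) (le_refl 0)]
  simp only [show ((0 : Int) % 2 = 1) = False by simp, decide_false]
  norm_num
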